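-- pv_equiv track=rewrite | github.com/fraseralex96/T1-Diabetes-SNP-Portal | final_website/functions.py | goTerms
-- ===== SOURCE A (Python) =====
-- def goTerms(search, goJSON, searchTerm): # creates data for the gene ontology table if the search is either gene or SNP
-- 		l15 = []
-- 		l16 = []
-- 		l17 = []
-- 		l18 = []
-- 		l19 = []
--
-- 		for i in goJSON:
-- 			if (search in i[searchTerm]) is True: # search term differentiates between searches for SNP and gene
-- 				l15.append(i['gene_name'])
-- 				l16.append(i['go_domain'])
-- 				l17.append(i['go_term_name'])
-- 				l18.append(i['go_term_definition'])
-- 				l19.append(i['go_term_accession'])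
--
-- 		return [l15,l16,l17, l18, l19]
-- ===== SOURCE B (Python) =====
-- def goTerms(search, goJSON, searchTerm):
--     matches = [i for i in goJSON if search in i[searchTerm]]
--     keys = ['gene_name', 'go_domain', 'go_term_name', 'go_term_definition', 'go_term_accession']
--     return [[m[k] for m in matches] for k in keys]
-- ===== Notes on version B (the rewrite author's own statement) =====
-- stated objective: alternative
-- what changed: A's single interleaved loop appending to five parallel accumulator lists is replaced by a filter pass that collects the matching records followed by a column-oriented projection pass over a list of the five keys; no per-column accumulators are maintained.
import Mathlib
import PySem

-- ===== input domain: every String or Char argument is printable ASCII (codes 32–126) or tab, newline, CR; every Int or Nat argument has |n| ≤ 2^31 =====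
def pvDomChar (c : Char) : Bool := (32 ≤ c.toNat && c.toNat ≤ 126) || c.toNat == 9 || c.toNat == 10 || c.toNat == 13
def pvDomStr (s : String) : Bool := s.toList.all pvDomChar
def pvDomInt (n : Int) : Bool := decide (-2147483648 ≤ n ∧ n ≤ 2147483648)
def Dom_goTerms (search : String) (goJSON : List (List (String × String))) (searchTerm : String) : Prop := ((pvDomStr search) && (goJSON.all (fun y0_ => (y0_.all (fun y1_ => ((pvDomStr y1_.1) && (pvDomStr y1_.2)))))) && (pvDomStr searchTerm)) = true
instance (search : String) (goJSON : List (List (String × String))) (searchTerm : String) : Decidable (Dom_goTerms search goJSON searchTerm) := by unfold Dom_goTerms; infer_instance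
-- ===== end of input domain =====

-- B replaces A's interleaved five-accumulator loop by a filter pass plus a per-key column projection (alternative decomposition, same cost).


-- ===== PORT A =====
-- dict lookup d[k] on an association list: first match; `none` = KeyError (excluded by Pre_)
def pvLk (d : List (String × String)) (k : String) : Option String :=
  (d.find? (fun p => p.1 == k)).map (fun p => p.2)

def goTerms (search : String) (goJSON : List (List (String × String))) (searchTerm : String) : List (List String) :=
  let st := goJSON.foldl
    (fun (s : List String × List String × List String × List String × List String) i =>
      if PySem.Str.isIn search ((pvLk i searchTerm).getD "") then
        (s.1 ++ [(pvLk i "gene_name").getD ""],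
         s.2.1 ++ [(pvLk i "go_domain").getD ""],
         s.2.2.1 ++ [(pvLk i "go_term_name").getD ""],
         s.2.2.2.1 ++ [(pvLk i "go_term_definition").getD ""],
         s.2.2.2.2 ++ [(pvLk i "go_term_accession").getD ""])
      else s)
    ([], [], [], [], [])
  [st.1, st.2.1, st.2.2.1, st.2.2.2.1, st.2.2.2.2]

-- ===== PORT B =====
def goTerms_alt (search : String) (goJSON : List (List (String × String))) (searchTerm : String) : List (List String) :=
  let ms := goJSON.filter (fun i => PySem.Str.isIn search ((pvLk i searchTerm).getD ""))
  ["gene_name", "go_domain", "go_term_name", "go_term_definition", "go_term_accession"].map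
    (fun k => ms.map (fun m => (pvLk m k).getD ""))

-- ===== PRECONDITION & SPEC =====
-- Pre_ excludes exactly the inputs where Python A raises KeyError: a record without the
-- searchTerm key, or a matching record missing one of the five projected keys.
def Pre_goTerms (search : String) (goJSON : List (List (String × String))) (searchTerm : String) : Prop :=
  goJSON.all (fun i =>
    match pvLk i searchTerm with
    | none => false
    | some v =>
      !(PySem.Str.isIn search v) ||
        (["gene_name", "go_domain", "go_term_name", "go_term_definition", "go_term_accession"].all
          (fun k => (pvLk i k).isSome))) = true
instance (search : String) (goJSON : List (List (String × String))) (searchTerm : String) : Decidable (Pre_goTerms search goJSON searchTerm) := by unfold Pre_goTerms; infer_instance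

def pvWitness_goTerms : String × (List (List (String × String))) × String :=
  ("rs1", [[("snp", "rs12"), ("gene_name", "G1"), ("go_domain", "D1"), ("go_term_name", "N1"),
            ("go_term_definition", "Df1"), ("go_term_accession", "A1")],
           [("snp", "zz")]], "snp")

def Spec_goTerms (search : String) (goJSON : List (List (String × String))) (searchTerm : String) (out : List (List String)) : Prop := out = goTerms_alt search goJSON searchTerm
instance (search : String) (goJSON : List (List (String × String))) (searchTerm : String) (out : List (List String)) : Decidable (Spec_goTerms search goJSON searchTerm out) := by unfold Spec_goTerms; infer_instance

-- ===== CLAIM (what is proved, stated in full; the proofs are below) =====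
def Claim_equal_goTerms : Prop := ∀ (search : String) (goJSON : List (List (String × String))) (searchTerm : String), Dom_goTerms search goJSON searchTerm → Pre_goTerms search goJSON searchTerm → Spec_goTerms search goJSON searchTerm (goTerms search goJSON searchTerm)

-- ===== LEMMAS AND PROOFS =====
-- Invariant of A's loop: it appends the five projected columns of the matching records
-- to whatever is already in the accumulator.
theorem goTerms_foldl_eq (search searchTerm : String) (l : List (List (String × String)))
    (a b c d e : List String) :
    l.foldl
      (fun (s : List String × List String × List String × List String × List String) i =>
        if PySem.Str.isIn search ((pvLk i searchTerm).getD "") then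
          (s.1 ++ [(pvLk i "gene_name").getD ""],
           s.2.1 ++ [(pvLk i "go_domain").getD ""],
           s.2.2.1 ++ [(pvLk i "go_term_name").getD ""],
           s.2.2.2.1 ++ [(pvLk i "go_term_definition").getD ""],
           s.2.2.2.2 ++ [(pvLk i "go_term_accession").getD ""])
        else s)
      (a, b, c, d, e)
    = (let m := l.filter (fun i => PySem.Str.isIn search ((pvLk i searchTerm).getD ""))
       (a ++ m.map (fun i => (pvLk i "gene_name").getD ""),
        b ++ m.map (fun i => (pvLk i "go_domain").getD ""),
        c ++ m.map (fun i => (pvLk i "go_term_name").getD ""),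
        d ++ m.map (fun i => (pvLk i "go_term_definition").getD ""),
        e ++ m.map (fun i => (pvLk i "go_term_accession").getD ""))) := by
  induction l generalizing a b c d e with
  | nil => simp
  | cons hd tl ih =>
    by_cases h : PySem.Str.isIn search ((pvLk hd searchTerm).getD "") = true
    · rw [List.foldl_cons]
      simp only [h, if_true]
      rw [ih]
      simp only [PySem.Str.isIn] at h
      simp [h]
    · rw [List.foldl_cons]
      simp only [h, if_false, Bool.false_eq_true]
      rw [ih]
      simp only [PySem.Str.isIn] at h
      simp [h]

-- ===== VERDICT (by name: the statement is the Claim_ definition above) =====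
theorem goTerms_spec : Claim_equal_goTerms := by
  intro search goJSON searchTerm _ _
  unfold Spec_goTerms goTerms goTerms_alt
  rw [goTerms_foldl_eq]
  simp
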